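-- pv_equiv track=rewrite | github.com/AMalkov07/Find-dna-strings | pattern_finder_lcp.py | find_tandem_arrays_optimized
-- ===== SOURCE A (Python) =====
-- from typing import List, Tuple, Dict, Set, Optional
--
-- def find_tandem_arrays_optimized(known_positions: List[int], pattern_len: int) -> List[Tuple[int, int, int]]:
--     """
--     Find tandem arrays from known positions (much faster!)
--     Args:
--         known_positions: List of positions where pattern occurs (already found)
--         pattern_len: Length of the pattern
--     Returns: List[(start_pos, end_pos, copy_count)]
--     """
--     if len(known_positions) < 2:
--         return []
--
--     tandem_arrays = []
--     sorted_positions = sorted(known_positions)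
--
--     i = 0
--     while i < len(sorted_positions):
--         tandem_start = sorted_positions[i]
--         copy_count = 1
--         current_pos = tandem_start
--
--         # Count consecutive copies
--         for j in range(i + 1, len(sorted_positions)):
--             expected_pos = current_pos + pattern_len
--             if sorted_positions[j] == expected_pos:
--                 copy_count += 1
--                 current_pos = expected_pos
--             else:
--                 break
--
--         # If we found multiple consecutive copies, record this tandem array
--         if copy_count >= 2:
--             tandem_end = current_pos + pattern_len
--             tandem_arrays.append((tandem_start, tandem_end, copy_count))
--             i += copy_count  # Skip the positions we just processed
--         else:
--             i += 1
--
--     return tandem_arrays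
-- ===== SOURCE B (Python) =====
-- def find_tandem_arrays_optimized(known_positions, pattern_len):
--     out = []
--     run_start = None
--     count = 0
--     expected = 0
--     for p in sorted(known_positions):
--         if run_start is not None and p == expected:
--             count += 1
--             expected += pattern_len
--         else:
--             if run_start is not None and count >= 2:
--                 out.append((run_start, expected, count))
--             run_start, count, expected = p, 1, p + pattern_len
--     if run_start is not None and count >= 2:
--         out.append((run_start, expected, count))
--     return out
-- ===== Notes on version B (the rewrite author's own statement) =====
-- stated objective: simpler
-- what changed: Replaced the outer-while with manual index skipping plus an inner counting for-loop by one flat pass over the sorted positions that maintains a current-run state (start, count, expected next position) and flushes a run on mismatch and at the end; the length<2 guard disappears.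
import Mathlib
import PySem

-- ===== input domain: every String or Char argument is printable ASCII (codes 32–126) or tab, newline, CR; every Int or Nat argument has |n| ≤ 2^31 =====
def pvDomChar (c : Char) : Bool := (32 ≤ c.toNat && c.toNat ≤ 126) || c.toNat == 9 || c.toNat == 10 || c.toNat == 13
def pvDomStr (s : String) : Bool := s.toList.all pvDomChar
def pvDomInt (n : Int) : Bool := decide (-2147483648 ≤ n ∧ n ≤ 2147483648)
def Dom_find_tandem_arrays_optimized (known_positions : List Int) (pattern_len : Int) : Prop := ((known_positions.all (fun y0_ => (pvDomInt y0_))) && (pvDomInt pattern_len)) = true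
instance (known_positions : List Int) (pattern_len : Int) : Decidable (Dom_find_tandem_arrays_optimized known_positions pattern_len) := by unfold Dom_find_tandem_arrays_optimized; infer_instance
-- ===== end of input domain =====

-- B replaces A's outer-while with index skipping + inner counting loop by one flat
-- run-accumulating pass over the sorted positions (objective: simpler).


-- ===== PORT A =====
-- inner 'for j' loop: scans the suffix after position i, counting consecutive
-- copies, breaking at the first mismatch; returns (current_pos, copy_count, rest after break)
def pvInnerA (plen : Int) (cur : Int) (cnt : Int) : List Int → Int × Int × List Int
  | [] => (cur, cnt, [])
  | x :: rest =>
    if x = cur + plen then pvInnerA plen (cur + plen) (cnt + 1) rest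
    else (cur, cnt, x :: rest)

theorem pvInnerA_len_le (plen cur cnt : Int) (xs : List Int) :
    (pvInnerA plen cur cnt xs).2.2.length ≤ xs.length := by
  induction xs generalizing cur cnt with
  | nil => simp [pvInnerA]
  | cons x rest ih =>
    simp only [pvInnerA]
    split
    · exact le_trans (ih _ _) (by simp)
    · simp

-- outer 'while i < len' loop: the suffix starting at index i is the argument;
-- 'i += copy_count' is exactly dropping the matched elements (the rest returned by the inner loop)
def pvOuterA (plen : Int) (acc : List (Int × Int × Int)) : List Int → List (Int × Int × Int)
  | [] => acc
  | p :: rest =>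
    let r := pvInnerA plen p 1 rest
    if r.2.1 ≥ 2 then pvOuterA plen (acc ++ [(p, r.1 + plen, r.2.1)]) r.2.2
    else pvOuterA plen acc rest
termination_by xs => xs.length
decreasing_by
  · exact Nat.lt_succ_of_le (pvInnerA_len_le plen p 1 rest)
  · simp

def find_tandem_arrays_optimized (known_positions : List Int) (pattern_len : Int) : List (Int × Int × Int) :=
  if known_positions.length < 2 then []
  else pvOuterA pattern_len [] (PySem.List.sorted known_positions (fun x => x) false)

-- ===== PORT B =====
-- one step of B's flat pass; state = (current run (start, count, expected) or none, output so far)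
def pvStepB (plen : Int) (st : Option (Int × Int × Int) × List (Int × Int × Int)) (p : Int) :
    Option (Int × Int × Int) × List (Int × Int × Int) :=
  match st.1 with
  | some (rs, cnt, exp) =>
    if p = exp then (some (rs, cnt + 1, exp + plen), st.2)
    else (some (p, 1, p + plen), if cnt ≥ 2 then st.2 ++ [(rs, exp, cnt)] else st.2)
  | none => (some (p, 1, p + plen), st.2)

-- the final flush after the loop
def pvFlushB (st : Option (Int × Int × Int) × List (Int × Int × Int)) : List (Int × Int × Int) :=
  match st.1 with
  | some (rs, cnt, exp) => if cnt ≥ 2 then st.2 ++ [(rs, exp, cnt)] else st.2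
  | none => st.2

def find_tandem_arrays_optimized_alt (known_positions : List Int) (pattern_len : Int) : List (Int × Int × Int) :=
  pvFlushB ((PySem.List.sorted known_positions (fun x => x) false).foldl (pvStepB pattern_len) (none, []))

-- ===== PRECONDITION & SPEC =====
def Spec_find_tandem_arrays_optimized (known_positions : List Int) (pattern_len : Int) (out : List (Int × Int × Int)) : Prop := out = find_tandem_arrays_optimized_alt known_positions pattern_len
instance (known_positions : List Int) (pattern_len : Int) (out : List (Int × Int × Int)) : Decidable (Spec_find_tandem_arrays_optimized known_positions pattern_len out) := by unfold Spec_find_tandem_arrays_optimized; infer_instance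

-- ===== CLAIM (what is proved, stated in full; the proofs are below) =====
def Claim_equal_find_tandem_arrays_optimized : Prop := ∀ (known_positions : List Int) (pattern_len : Int), Dom_find_tandem_arrays_optimized known_positions pattern_len → Spec_find_tandem_arrays_optimized known_positions pattern_len (find_tandem_arrays_optimized known_positions pattern_len)

-- ===== LEMMAS AND PROOFS =====

-- B's sweep from a 'none' state, with the accumulated output as parameter
def pvSweepB (plen : Int) (acc : List (Int × Int × Int)) (ys : List Int) : List (Int × Int × Int) :=
  pvFlushB (ys.foldl (pvStepB plen) (none, acc))

-- the inner loop result count never decreases, and staying equal means no element matched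
theorem pvInnerA_cnt_ge (plen cur cnt : Int) (xs : List Int) :
    cnt ≤ (pvInnerA plen cur cnt xs).2.1 := by
  induction xs generalizing cur cnt with
  | nil => simp [pvInnerA]
  | cons x rest ih =>
    simp only [pvInnerA]
    split
    · exact le_trans (by omega) (ih _ _)
    · simp

theorem pvInnerA_cnt_eq (plen cur cnt : Int) (xs : List Int)
    (h : (pvInnerA plen cur cnt xs).2.1 = cnt) : (pvInnerA plen cur cnt xs).2.2 = xs := by
  cases xs with
  | nil => simp [pvInnerA]
  | cons x rest =>
    by_cases hx : x = cur + plen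
    · exfalso
      have := pvInnerA_cnt_ge plen (cur + plen) (cnt + 1) rest
      simp only [pvInnerA, if_pos hx] at h
      omega
    · simp [pvInnerA, if_neg hx]

-- B's sweep with a live run state equals: run A's inner loop, flush the run, resume from 'none'
theorem pvSweep_run (plen : Int) : ∀ (rest : List Int) (rs cnt cur : Int) (acc : List (Int × Int × Int)),
    pvFlushB (rest.foldl (pvStepB plen) (some (rs, cnt, cur + plen), acc)) =
      pvSweepB plen
        (if (pvInnerA plen cur cnt rest).2.1 ≥ 2 then
            acc ++ [(rs, (pvInnerA plen cur cnt rest).1 + plen, (pvInnerA plen cur cnt rest).2.1)]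
          else acc)
        (pvInnerA plen cur cnt rest).2.2 := by
  intro rest
  induction rest with
  | nil => intro rs cnt cur acc; simp [pvInnerA, pvSweepB, pvFlushB]
  | cons x rest ih =>
    intro rs cnt cur acc
    simp only [pvInnerA, List.foldl_cons, pvStepB]
    by_cases hx : x = cur + plen
    · simp only [hx]
      exact ih rs (cnt + 1) (cur + plen) acc
    · simp only [if_neg hx]
      simp [pvSweepB, pvStepB]

-- A's outer loop equals B's sweep, on any list
theorem pvOuter_eq_sweep (plen : Int) : ∀ (ys : List Int) (acc : List (Int × Int × Int)),
    pvOuterA plen acc ys = pvSweepB plen acc ys := by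
  intro ys
  induction hn : ys.length using Nat.strong_induction_on generalizing ys with
  | _ n ih =>
    intro acc
    cases ys with
    | nil => simp [pvOuterA, pvSweepB, pvFlushB]
    | cons p rest =>
      have hkey : pvSweepB plen acc (p :: rest) =
          pvSweepB plen
            (if (pvInnerA plen p 1 rest).2.1 ≥ 2 then
                acc ++ [(p, (pvInnerA plen p 1 rest).1 + plen, (pvInnerA plen p 1 rest).2.1)]
              else acc)
            (pvInnerA plen p 1 rest).2.2 := by
        simpa [pvSweepB, pvStepB] using pvSweep_run plen rest p 1 p acc
      rw [pvOuterA, hkey]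
      by_cases h2 : (pvInnerA plen p 1 rest).2.1 ≥ 2
      · simp only [if_pos h2]
        exact ih _ (by subst hn; simpa using Nat.lt_succ_of_le (pvInnerA_len_le plen p 1 rest)) _ rfl _
      · have hcnt : (pvInnerA plen p 1 rest).2.1 = 1 := by
          have := pvInnerA_cnt_ge plen p 1 rest; omega
        have hrem := pvInnerA_cnt_eq plen p 1 rest hcnt
        simp only [if_neg h2, hrem]
        exact ih _ (by subst hn; simp) _ rfl _

-- ===== VERDICT (by name: the statement is the Claim_ definition above) =====
theorem find_tandem_arrays_optimized_spec : Claim_equal_find_tandem_arrays_optimized := by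
  intro xs plen _
  unfold Spec_find_tandem_arrays_optimized find_tandem_arrays_optimized find_tandem_arrays_optimized_alt
  split
  · rename_i hlen
    -- length < 2: the sorted list has 0 or 1 elements; B's sweep produces []
    rcases hs : PySem.List.sorted xs (fun x => x) false with _ | ⟨a, _ | ⟨b, t⟩⟩
    · simp [pvFlushB]
    · simp [pvStepB, pvFlushB]
    · exfalso
      have := PySem.List.length_sorted (xs := xs) (key := fun x => x) (rev := false)
      rw [hs] at this; simp at this; omega
  · rw [pvOuter_eq_sweep]; rfl
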